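-- pv_equiv track=rewrite | github.com/GrahamStrickland/epi | ch05/tests/test_dutch_national_flag.py | is_partitioned
-- ===== SOURCE A (Python) =====
-- def is_partitioned(pivot: int, A: list[int]) -> bool:
--     lesser = True
--     greater = False
--     for i in A:
--         if lesser:
--             if i == pivot:
--                 lesser = False
--             elif i > pivot:
--                 return False
--         elif not lesser and not greater:
--             if i > pivot:
--                 greater = True
--             elif i < pivot:
--                 return False
--         else:
--             if i <= pivot or i == pivot:
--                 return False
--     return True
-- ===== SOURCE B (Python) =====
-- def is_partitioned(pivot: int, A: list[int]) -> bool: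
--     # classify each element: 0 = below pivot, 1 = equal, 2 = above
--     cats = [0 if x < pivot else 1 if x == pivot else 2 for x in A]
--     # the greater region is only legal when a pivot element exists
--     if 2 in cats and 1 not in cats:
--         return False
--     # partitioned iff the category sequence is nondecreasing
--     return all(a <= b for a, b in zip(cats, cats[1:]))
-- ===== Notes on version B (the rewrite author's own statement) =====
-- stated objective: alternative
-- what changed: Replaces A's one-pass boolean state machine with a declarative check: map each element to a category 0/1/2 (below/equal/above pivot), reject a list containing an above-pivot element but no pivot, and otherwise test that the category sequence is nondecreasing.
import Mathlib
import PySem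

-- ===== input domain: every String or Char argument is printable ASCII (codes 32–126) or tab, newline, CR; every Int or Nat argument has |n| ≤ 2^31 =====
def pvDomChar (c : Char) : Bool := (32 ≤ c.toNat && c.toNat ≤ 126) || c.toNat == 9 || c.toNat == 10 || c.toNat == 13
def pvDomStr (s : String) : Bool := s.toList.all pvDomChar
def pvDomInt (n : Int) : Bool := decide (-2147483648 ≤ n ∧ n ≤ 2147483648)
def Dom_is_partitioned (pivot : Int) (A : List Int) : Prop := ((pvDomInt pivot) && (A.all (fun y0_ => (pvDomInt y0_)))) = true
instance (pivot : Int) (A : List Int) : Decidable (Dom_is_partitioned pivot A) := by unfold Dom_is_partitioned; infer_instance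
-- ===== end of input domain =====

set_option maxRecDepth 8000


-- B replaces A's one-pass two-flag state machine with a declarative check on the element categories (alternative formulation; same O(n) cost).
-- ===== PORT A =====
-- the for-loop with early return, carrying the (lesser, greater) flags
def pvLoopA (pivot : Int) : List Int → Bool → Bool → Bool
  | [], _, _ => true
  | i :: rest, lesser, greater =>
    if lesser then
      if i = pivot then pvLoopA pivot rest false greater
      else if i > pivot then false
      else pvLoopA pivot rest lesser greater
    else if !lesser && !greater then
      if i > pivot then pvLoopA pivot rest lesser true
      else if i < pivot then false
      else pvLoopA pivot rest lesser greater
    else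
      if i ≤ pivot || i = pivot then false
      else pvLoopA pivot rest lesser greater

def is_partitioned (pivot : Int) (A : List Int) : Bool := pvLoopA pivot A true false

-- ===== PORT B =====
-- category of an element: 0 below the pivot, 1 equal, 2 above
def pvCat (pivot x : Int) : Int := if x < pivot then 0 else if x = pivot then 1 else 2

-- `all(a <= b for a, b in zip(cats, cats[1:]))`: adjacent pairs nondecreasing
def pvNondec : List Int → Bool
  | [] => true
  | [_] => true
  | a :: b :: r => (a ≤ b : Bool) && pvNondec (b :: r)

def is_partitioned_alt (pivot : Int) (A : List Int) : Bool :=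
  let cats := A.map (pvCat pivot)
  if cats.contains 2 && !(cats.contains 1) then false
  else pvNondec cats

-- ===== PRECONDITION & SPEC =====
def Spec_is_partitioned (pivot : Int) (A : List Int) (out : Bool) : Prop := out = is_partitioned_alt pivot A
instance (pivot : Int) (A : List Int) (out : Bool) : Decidable (Spec_is_partitioned pivot A out) := by unfold Spec_is_partitioned; infer_instance

-- ===== CLAIM (what is proved, stated in full; the proofs are below) =====
def Claim_equal_is_partitioned : Prop := ∀ (pivot : Int) (A : List Int), Dom_is_partitioned pivot A → Spec_is_partitioned pivot A (is_partitioned pivot A)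

-- ===== LEMMAS AND PROOFS =====

-- A's third phase (lesser=false, greater=true): accepted iff every category is 2,
-- which is exactly nondecreasing-from-2 for a category list
lemma loopA_ft (pivot : Int) : ∀ l : List Int,
    pvLoopA pivot l false true = pvNondec (2 :: l.map (pvCat pivot)) := by
  intro l
  induction l with
  | nil => rfl
  | cons x xs ih =>
    by_cases hle : x ≤ pivot
    · by_cases hlt : x < pivot
      · simp [pvLoopA, pvNondec, pvCat, hle, hlt]
      · have heq : x = pivot := le_antisymm hle (le_of_not_gt hlt)
        simp [pvLoopA, pvNondec, pvCat, hle, heq]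
    · have hne : x ≠ pivot := fun h => hle (le_of_eq h)
      have hnlt : ¬ x < pivot := fun h => hle (le_of_lt h)
      simp [pvLoopA, pvNondec, pvCat, hle, hne, hnlt, ih]

-- A's second phase (lesser=false, greater=false): nondecreasing-from-1
lemma loopA_ff (pivot : Int) : ∀ l : List Int,
    pvLoopA pivot l false false = pvNondec (1 :: l.map (pvCat pivot)) := by
  intro l
  induction l with
  | nil => rfl
  | cons x xs ih =>
    by_cases heq : x = pivot
    · simp [pvLoopA, pvNondec, pvCat, heq, ih]
    · by_cases hgt : pivot < x
      · have h1 : ¬ x < pivot := not_lt_of_gt hgt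
        have h2 : ¬ x ≤ pivot := not_le_of_gt hgt
        simp [pvLoopA, pvNondec, pvCat, heq, hgt, h1, loopA_ft]
      · have hlt : x < pivot := lt_of_le_of_ne (le_of_not_gt hgt) heq
        simp [pvLoopA, pvNondec, pvCat, hgt, hlt]

-- nondecreasing-from-2 over categories forces every remaining element above the pivot
lemma nondec_two_all_gt (pivot : Int) : ∀ l : List Int,
    pvNondec (2 :: l.map (pvCat pivot)) = true → ∀ x ∈ l, pivot < x := by
  intro l
  induction l with
  | nil => simp
  | cons y ys ih =>
    intro h x hx
    by_cases hle : y ≤ pivot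
    · by_cases hylt : y < pivot
      · simp [pvNondec, pvCat, hylt] at h
      · have heq : y = pivot := le_antisymm hle (le_of_not_gt hylt)
        simp [pvNondec, pvCat, heq] at h
    · have hgt : pivot < y := lt_of_not_ge hle
      have hne : y ≠ pivot := by omega
      have hnlt : ¬ y < pivot := not_lt_of_gt hgt
      have htail : pvNondec (2 :: ys.map (pvCat pivot)) = true := by
        simpa [pvNondec, pvCat, hnlt, hne] using h
      rcases List.mem_cons.mp hx with rfl | hx'
      · exact hgt
      · exact ih htail x hx'

-- when the first element's category is 2 (no pivot seen yet), B rejects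
lemma alt_head_two (pivot x : Int) (xs : List Int) (hgt : pivot < x) :
    is_partitioned_alt pivot (x :: xs) = false := by
  have hne : x ≠ pivot := by omega
  have hnlt : ¬ x < pivot := not_lt_of_gt hgt
  unfold is_partitioned_alt
  simp only [List.map, pvCat, hnlt, hne, if_false]
  by_cases hone : (xs.map (pvCat pivot)).contains 1 = true
  · have hnd : pvNondec (2 :: xs.map (pvCat pivot)) = false := by
      cases hnd : pvNondec (2 :: xs.map (pvCat pivot)) with
      | false => rfl
      | true =>
        exfalso
        have h1 : (1 : Int) ∈ xs.map (pvCat pivot) := by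
          simpa [List.contains_iff_mem] using hone
        obtain ⟨y, hy, hcy⟩ := List.mem_map.mp h1
        have := nondec_two_all_gt pivot xs hnd y hy
        unfold pvCat at hcy
        split_ifs at hcy <;> omega
    simp [hnd]
  · have h2 : ((2 : Int) :: xs.map (pvCat pivot)).contains 2 = true := by simp
    have h1 : ((2 : Int) :: xs.map (pvCat pivot)).contains 1 = false := by
      simpa using hone
    rw [h2, h1]
    rfl

-- A's first phase equals B
lemma loopA_tf (pivot : Int) : ∀ l : List Int,
    pvLoopA pivot l true false = is_partitioned_alt pivot l := by
  intro l
  induction l with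
  | nil => rfl
  | cons x xs ih =>
    by_cases heq : x = pivot
    · -- pivot element: enter phase 2; guard is off since category 1 is present
      subst heq
      have hstep : pvLoopA x (x :: xs) true false = pvLoopA x xs false false := by
        simp [pvLoopA]
      rw [hstep, loopA_ff]
      unfold is_partitioned_alt
      simp only [List.map, pvCat, lt_irrefl]
      have hone : ((1 : Int) :: xs.map (pvCat x)).contains 1 = true := by simp
      simp [hone]
    · by_cases hlt : x < pivot
      · -- below-pivot element: category 0 changes neither the guard nor nondecreasingness
        have h1 : ¬ pivot < x := not_lt_of_gt hlt
        rw [pvLoopA, if_pos rfl, if_neg heq, if_neg (by simpa using h1), ih]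
        unfold is_partitioned_alt
        simp only [List.map, pvCat, hlt]
        cases hxs : xs.map (pvCat pivot) with
        | nil => simp [pvNondec]
        | cons c cs =>
          have hc : 0 ≤ c := by
            have : c ∈ xs.map (pvCat pivot) := by rw [hxs]; exact List.mem_cons_self ..
            obtain ⟨y, _, hy⟩ := List.mem_map.mp this
            unfold pvCat at hy; split_ifs at hy <;> omega
          simp [pvNondec, hc]
      · -- above-pivot element first: A returns false, and so does B
        have hgt : pivot < x := lt_of_le_of_ne (le_of_not_gt hlt) (Ne.symm heq)
        rw [pvLoopA, if_pos rfl, if_neg heq, if_pos (by simpa using hgt),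
            alt_head_two pivot x xs hgt]

-- ===== VERDICT (by name: the statement is the Claim_ definition above) =====
theorem is_partitioned_spec : Claim_equal_is_partitioned := by
  intro pivot A _
  unfold Spec_is_partitioned is_partitioned
  exact loopA_tf pivot A
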